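-- pv_equiv track=rewrite | github.com/MaykollRocha/estudos_python | Lista_exercicios/exercícios_lista_5.py | quadrado_resto4
-- ===== SOURCE A (Python) =====
-- def quadrado_resto4(matrix, n):
--     cubo = [[0 for j in range(n)] for i in range(n)]
--     matrizB = [[matrix[i][j]
--                 for j in range(len(matrix)-1, -1, -1)] for i in range(len(matrix)-1, -1, -1)]
--
--     for i in range(n):
--         for j in range(n):
--             if i == j or i+j == (n-1):
--                 cubo[i][j] = matrizB[i][j]
--             else:
--                 cubo[i][j] = matrix[i][j]
--
--     return cubo
-- ===== SOURCE B (Python) =====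
-- def quadrado_resto4(matrix, n):
--     # Copy the original region, then overwrite only the two diagonals
--     # with values from the reversed matrix (reversed over len(matrix)).
--     L = len(matrix)
--     cubo = [[matrix[i][j] for j in range(n)] for i in range(n)]
--     for i in range(n):
--         cubo[i][i] = matrix[L - 1 - i][L - 1 - i]
--         cubo[i][n - 1 - i] = matrix[L - 1 - i][L - 1 - (n - 1 - i)]
--     return cubo
-- ===== Notes on version B (the rewrite author's own statement) =====
-- stated objective: simpler
-- what changed: B drops the reversed matrizB table and the per-cell diagonal branch: it copies the original region in one comprehension and then overwrites only the two diagonal cells per row in a single pass.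
import Mathlib
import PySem

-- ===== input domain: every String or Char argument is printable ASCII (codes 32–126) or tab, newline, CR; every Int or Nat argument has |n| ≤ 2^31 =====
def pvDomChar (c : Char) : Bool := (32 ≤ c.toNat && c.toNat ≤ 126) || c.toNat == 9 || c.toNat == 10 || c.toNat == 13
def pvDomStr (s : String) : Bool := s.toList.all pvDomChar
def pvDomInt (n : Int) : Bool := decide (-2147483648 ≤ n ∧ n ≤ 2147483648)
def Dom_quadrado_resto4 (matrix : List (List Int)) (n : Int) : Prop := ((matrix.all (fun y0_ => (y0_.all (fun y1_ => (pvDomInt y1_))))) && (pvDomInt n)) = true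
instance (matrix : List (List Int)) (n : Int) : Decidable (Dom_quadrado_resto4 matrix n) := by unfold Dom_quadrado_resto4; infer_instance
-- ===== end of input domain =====

-- B replaces A's reversed table + per-cell branch by a copy of the original region
-- followed by a single pass overwriting only the two diagonal cells of each row.

-- cubo[i][j] = v  (indices nonnegative here; total form used under Pre_)
def pvSetCell (m : List (List Int)) (i j : Int) (v : Int) : List (List Int) :=
  PySem.List.pySetD m i (PySem.List.pySetD (PySem.List.pyGetD m i []) j v)

-- ===== PORT A =====
def quadrado_resto4 (matrix : List (List Int)) (n : Int) : List (List Int) :=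
  let cubo := (PySem.List.pyRange 0 n 1).map (fun _ => (PySem.List.pyRange 0 n 1).map (fun _ => (0 : Int)))
  let matrizB := (PySem.List.pyRange ((matrix.length : Int) - 1) (-1) (-1)).map (fun i =>
      (PySem.List.pyRange ((matrix.length : Int) - 1) (-1) (-1)).map (fun j =>
        PySem.List.pyGetD (PySem.List.pyGetD matrix i []) j 0))
  (PySem.List.pyRange 0 n 1).foldl (fun cubo i =>
    (PySem.List.pyRange 0 n 1).foldl (fun cubo j =>
      if i = j ∨ i + j = n - 1 then
        pvSetCell cubo i j (PySem.List.pyGetD (PySem.List.pyGetD matrizB i []) j 0)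
      else
        pvSetCell cubo i j (PySem.List.pyGetD (PySem.List.pyGetD matrix i []) j 0)) cubo) cubo

-- ===== PORT B =====
def quadrado_resto4_alt (matrix : List (List Int)) (n : Int) : List (List Int) :=
  let L : Int := (matrix.length : Int)
  let cubo := (PySem.List.pyRange 0 n 1).map (fun i =>
      (PySem.List.pyRange 0 n 1).map (fun j =>
        PySem.List.pyGetD (PySem.List.pyGetD matrix i []) j 0))
  (PySem.List.pyRange 0 n 1).foldl (fun cubo i =>
    let c := pvSetCell cubo i i (PySem.List.pyGetD (PySem.List.pyGetD matrix (L - 1 - i) []) (L - 1 - i) 0)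
    pvSetCell c i (n - 1 - i) (PySem.List.pyGetD (PySem.List.pyGetD matrix (L - 1 - i) []) (L - 1 - (n - 1 - i)) 0)) cubo

-- ===== PRECONDITION & SPEC =====
-- Pre_ = exactly the inputs where Python A returns (no IndexError): every row is
-- at least len(matrix) long (the reversed table reads all of them), and a positive n
-- must not exceed len(matrix).
def Pre_quadrado_resto4 (matrix : List (List Int)) (n : Int) : Prop :=
  (∀ row ∈ matrix, matrix.length ≤ row.length) ∧ (1 ≤ n → n ≤ (matrix.length : Int))
instance (matrix : List (List Int)) (n : Int) : Decidable (Pre_quadrado_resto4 matrix n) := by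
  unfold Pre_quadrado_resto4; infer_instance

def pvWitness_quadrado_resto4 : List (List Int) × Int := ([[1, 2, 3], [4, 5, 6], [7, 8, 9]], 3)

def Spec_quadrado_resto4 (matrix : List (List Int)) (n : Int) (out : List (List Int)) : Prop := out = quadrado_resto4_alt matrix n
instance (matrix : List (List Int)) (n : Int) (out : List (List Int)) : Decidable (Spec_quadrado_resto4 matrix n out) := by unfold Spec_quadrado_resto4; infer_instance

-- ===== CLAIM (what is proved, stated in full; the proofs are below) =====
def Claim_equal_quadrado_resto4 : Prop := ∀ (matrix : List (List Int)) (n : Int), Dom_quadrado_resto4 matrix n → Pre_quadrado_resto4 matrix n → Spec_quadrado_resto4 matrix n (quadrado_resto4 matrix n)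


-- ===== LEMMAS AND PROOFS =====

-- abbreviation for the reversed table A builds (mirror of the let-bound matrizB)
def pvMatB (matrix : List (List Int)) : List (List Int) :=
  (PySem.List.pyRange ((matrix.length : Int) - 1) (-1) (-1)).map (fun i =>
    (PySem.List.pyRange ((matrix.length : Int) - 1) (-1) (-1)).map (fun j =>
      PySem.List.pyGetD (PySem.List.pyGetD matrix i []) j 0))

-- the value A writes at cell (i, j)
def pvA (matrix : List (List Int)) (n i j : Int) : Int :=
  if i = j ∨ i + j = n - 1 then
    PySem.List.pyGetD (PySem.List.pyGetD (pvMatB matrix) i []) j 0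
  else
    PySem.List.pyGetD (PySem.List.pyGetD matrix i []) j 0

-- the row transformation B applies to row i
def pvBrow (matrix : List (List Int)) (n i : Int) (old : List Int) : List Int :=
  PySem.List.pySetD
    (PySem.List.pySetD old i
      (PySem.List.pyGetD (PySem.List.pyGetD matrix ((matrix.length : Int) - 1 - i) [])
        ((matrix.length : Int) - 1 - i) 0))
    (n - 1 - i)
    (PySem.List.pyGetD (PySem.List.pyGetD matrix ((matrix.length : Int) - 1 - i) [])
      ((matrix.length : Int) - 1 - (n - 1 - i)) 0)

lemma pv_take_set_succ {a : Type} (l : List a) (m : Nat) (v : a) (h : m < l.length) :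
    (l.set m v).take (m + 1) = l.take m ++ [v] := by
  induction l generalizing m with
  | nil => simp at h
  | cons x xs ih =>
    cases m with
    | zero => simp
    | succ m => simp [ih m (by simpa using h)]

lemma pv_getD_setD {a : Type} (c : List a) (i : Int) (v d : a) (hi : 0 ≤ i)
    (h : i.toNat < c.length) :
    PySem.List.pyGetD (PySem.List.pySetD c i v) i d = v := by
  obtain ⟨m, rfl⟩ : ∃ m : Nat, i = (m : Int) := ⟨i.toNat, by omega⟩
  have hm : m < c.length := by omega
  simp [List.getD_eq_getElem?_getD, List.getElem?_set_self (by simpa using hm)]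

lemma pv_setD_setD {a : Type} (c : List a) (i : Int) (v w : a) (hi : 0 ≤ i) :
    PySem.List.pySetD (PySem.List.pySetD c i v) i w = PySem.List.pySetD c i w := by
  rw [PySem.List.pySetD_of_nonneg _ _ hi, PySem.List.pySetD_of_nonneg _ _ hi,
    PySem.List.pySetD_of_nonneg _ _ hi, List.set_set]

lemma pv_setD_self {a : Type} (c : List a) (i : Int) (d : a) (hi : 0 ≤ i)
    (h : i.toNat < c.length) :
    PySem.List.pySetD c i (PySem.List.pyGetD c i d) = c := by
  obtain ⟨m, rfl⟩ : ∃ m : Nat, i = (m : Int) := ⟨i.toNat, by omega⟩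
  have hm : m < c.length := by omega
  simp [List.getD_eq_getElem?_getD, List.getElem?_eq_getElem hm, List.set_getElem_self]

-- one pass over range(a, n) that rewrites position i from the untouched suffix
lemma pv_pass {a : Type} (n : Int) (cubo0 : List a) (d : a)
    (step : List a → Int → List a) (F : Int → a → a)
    (hstep : ∀ (c : List a) (i : Int), 0 ≤ i → i < n → c.length = n.toNat →
      step c i = PySem.List.pySetD c i (F i (PySem.List.pyGetD c i d))) :
    ∀ (N : Nat) (lo : Int) (row : List a), (n - lo).toNat = N → 0 ≤ lo →
      row.length = n.toNat → (∀ k : Nat, lo.toNat ≤ k → row[k]? = cubo0[k]?) →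
      (PySem.List.pyRange lo n 1).foldl step row
        = row.take lo.toNat
            ++ (PySem.List.pyRange lo n 1).map (fun i => F i (PySem.List.pyGetD cubo0 i d)) := by
  intro N
  induction N with
  | zero =>
    intro lo row hN hlo hlen hext
    rw [PySem.List.pyRange_one_eq_nil (by omega)]
    simp [List.take_of_length_le (by omega : row.length ≤ lo.toNat)]
  | succ N ih =>
    intro lo row hN hlo hlen hext
    have hlt : lo < n := by omega
    rw [PySem.List.pyRange_one_cons hlt]
    simp only [List.foldl_cons, List.map_cons]
    have hget : PySem.List.pyGetD row lo d = PySem.List.pyGetD cubo0 lo d := by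
      obtain ⟨m, rfl⟩ : ∃ m : Nat, lo = (m : Int) := ⟨lo.toNat, by omega⟩
      rw [PySem.List.pyGetD_natCast, PySem.List.pyGetD_natCast,
        List.getD_eq_getElem?_getD, List.getD_eq_getElem?_getD, hext m (by omega)]
    rw [hstep row lo hlo hlt hlen, hget, PySem.List.pySetD_of_nonneg _ _ hlo]
    rw [ih (lo + 1) (row.set lo.toNat (F lo (PySem.List.pyGetD cubo0 lo d))) (by omega)
      (by omega) (by simp [hlen])
      (fun k hk => by
        rw [List.getElem?_set_ne (by omega), hext k (by omega)])]
    rw [show (lo + 1).toNat = lo.toNat + 1 by omega,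
      pv_take_set_succ row lo.toNat _ (by omega)]
    simp

-- the 2-D cell writes of one row collapse to a single row update
lemma pv_inner (g : Int → Int) :
    ∀ (js : List Int) (c : List (List Int)) (i : Int), 0 ≤ i → i.toNat < c.length →
      js.foldl (fun c j => pvSetCell c i j (g j)) c
        = PySem.List.pySetD c i
            (js.foldl (fun r j => PySem.List.pySetD r j (g j)) (PySem.List.pyGetD c i [])) := by
  intro js
  induction js with
  | nil =>
    intro c i hi h
    simp [pv_setD_self c i [] hi h]
  | cons j js ih =>
    intro c i hi h
    simp only [List.foldl_cons]
    have hc : pvSetCell c i j (g j)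
        = PySem.List.pySetD c i (PySem.List.pySetD (PySem.List.pyGetD c i []) j (g j)) := rfl
    rw [hc, ih _ i hi (by rw [PySem.List.pySetD_of_nonneg _ _ hi]; simpa using h),
      pv_getD_setD c i _ [] hi h, pv_setD_setD c i _ _ hi]

-- closed form of port A: cell (i, j) holds pvA matrix n i j
lemma pv_A_closed (matrix : List (List Int)) (n : Int) :
    quadrado_resto4 matrix n
      = (PySem.List.pyRange 0 n 1).map (fun i =>
          (PySem.List.pyRange 0 n 1).map (fun j => pvA matrix n i j)) := by
  simp only [quadrado_resto4]
  rw [pv_pass n ((PySem.List.pyRange 0 n 1).map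
        (fun _ => (PySem.List.pyRange 0 n 1).map (fun _ => (0 : Int)))) []
      _ (fun i old => (PySem.List.pyRange 0 n 1).foldl
          (fun r j => PySem.List.pySetD r j (pvA matrix n i j)) old)
      (fun c i hi0 hin hlen => by
        have h1 : (fun (c : List (List Int)) (j : Int) =>
            if i = j ∨ i + j = n - 1 then
              pvSetCell c i j (PySem.List.pyGetD (PySem.List.pyGetD
                ((PySem.List.pyRange ((matrix.length : Int) - 1) (-1) (-1)).map (fun i =>
                  (PySem.List.pyRange ((matrix.length : Int) - 1) (-1) (-1)).map (fun j =>
                    PySem.List.pyGetD (PySem.List.pyGetD matrix i []) j 0))) i []) j 0)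
            else pvSetCell c i j (PySem.List.pyGetD (PySem.List.pyGetD matrix i []) j 0))
            = (fun c j => pvSetCell c i j (pvA matrix n i j)) := by
          funext c j
          simp only [pvA, pvMatB]
          split <;> rfl
        rw [h1]
        exact pv_inner _ _ c i hi0 (by omega))
      ((n - 0).toNat) 0 _ rfl le_rfl
      (by simp [PySem.List.length_pyRange_one]) (fun k _ => rfl)]
  simp only [Int.toNat_zero, List.take_zero, List.nil_append]
  apply List.map_congr_left
  intro i hi
  rw [PySem.List.mem_pyRange_one] at hi
  rw [PySem.List.pyGetD_map_pyRange_of_nonneg _ n i [] hi.1 hi.2]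
  rw [pv_pass n ((PySem.List.pyRange 0 n 1).map (fun _ => (0 : Int))) 0
      _ (fun j _ => pvA matrix n i j) (fun c j _ _ _ => rfl)
      ((n - 0).toNat) 0 _ rfl le_rfl
      (by simp [PySem.List.length_pyRange_one]) (fun k _ => rfl)]
  simp

-- closed form of port B: row i is the copied row with its two diagonal cells overwritten
lemma pv_B_closed (matrix : List (List Int)) (n : Int) :
    quadrado_resto4_alt matrix n
      = (PySem.List.pyRange 0 n 1).map (fun i =>
          pvBrow matrix n i ((PySem.List.pyRange 0 n 1).map
            (fun j => PySem.List.pyGetD (PySem.List.pyGetD matrix i []) j 0))) := by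
  simp only [quadrado_resto4_alt]
  rw [pv_pass n ((PySem.List.pyRange 0 n 1).map (fun i =>
        (PySem.List.pyRange 0 n 1).map
          (fun j => PySem.List.pyGetD (PySem.List.pyGetD matrix i []) j 0))) []
      _ (fun i old => pvBrow matrix n i old)
      (fun c i hi0 hin hlen => by
        have h1 : pvSetCell c i i (PySem.List.pyGetD (PySem.List.pyGetD matrix
              ((matrix.length : Int) - 1 - i) []) ((matrix.length : Int) - 1 - i) 0)
            = PySem.List.pySetD c i (PySem.List.pySetD (PySem.List.pyGetD c i []) i
              (PySem.List.pyGetD (PySem.List.pyGetD matrix ((matrix.length : Int) - 1 - i) [])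
                ((matrix.length : Int) - 1 - i) 0)) := rfl
        have h2 : ∀ r v, pvSetCell (PySem.List.pySetD c i r) i (n - 1 - i) v
            = PySem.List.pySetD c i (PySem.List.pySetD r (n - 1 - i) v) := by
          intro r v
          show PySem.List.pySetD (PySem.List.pySetD c i r) i
              (PySem.List.pySetD (PySem.List.pyGetD (PySem.List.pySetD c i r) i []) (n - 1 - i) v)
            = _
          rw [pv_getD_setD c i r [] hi0 (by omega), pv_setD_setD c i _ _ hi0]
        simp only [h1, h2]
        rfl)
      ((n - 0).toNat) 0 _ rfl le_rfl
      (by simp [PySem.List.length_pyRange_one]) (fun k _ => rfl)]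
  simp only [Int.toNat_zero, List.take_zero, List.nil_append]
  apply List.map_congr_left
  intro i hi
  rw [PySem.List.mem_pyRange_one] at hi
  rw [PySem.List.pyGetD_map_pyRange_of_nonneg _ n i [] hi.1 hi.2]

-- the reversed table reads back as matrix[L-1-i][L-1-j]
lemma pv_matB_get (matrix : List (List Int)) (i j : Int) (hi0 : 0 ≤ i)
    (hi : i < (matrix.length : Int)) (hj0 : 0 ≤ j) (hj : j < (matrix.length : Int)) :
    PySem.List.pyGetD (PySem.List.pyGetD (pvMatB matrix) i []) j 0
      = PySem.List.pyGetD (PySem.List.pyGetD matrix ((matrix.length : Int) - 1 - i) [])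
          ((matrix.length : Int) - 1 - j) 0 := by
  obtain ⟨mi, rfl⟩ : ∃ m : Nat, i = (m : Int) := ⟨i.toNat, by omega⟩
  obtain ⟨mj, rfl⟩ : ∃ m : Nat, j = (m : Int) := ⟨j.toNat, by omega⟩
  unfold pvMatB
  rw [PySem.List.pyRange_neg_one,
    show ((matrix.length : Int) - 1 - (-1)).toNat = matrix.length by omega]
  simp only [List.map_map, PySem.List.pyGetD_natCast]
  rw [PySem.List.getD_map_range _ _ _ _ (by omega : mi < matrix.length)]
  simp only [Function.comp_apply]
  rw [PySem.List.getD_map_range _ _ _ _ (by omega : mj < matrix.length)]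
  simp


-- ===== VERDICT (by name: the statement is the Claim_ definition above) =====
theorem quadrado_resto4_spec : Claim_equal_quadrado_resto4 := by
  intro matrix n _ hpre
  unfold Spec_quadrado_resto4
  rw [pv_A_closed, pv_B_closed]
  apply List.map_congr_left
  intro i hi
  rw [PySem.List.mem_pyRange_one] at hi
  obtain ⟨hi0, hin⟩ := hi
  have hnL : n ≤ (matrix.length : Int) := hpre.2 (by omega)
  unfold pvBrow
  rw [PySem.List.pySetD_of_nonneg _ _ hi0, PySem.List.pySetD_of_nonneg _ _ (by omega : (0:Int) ≤ n - 1 - i)]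
  apply List.ext_getElem?
  intro k
  by_cases hk : k < n.toNat
  · have hlen1 : ((PySem.List.pyRange 0 n 1).map
        (fun j => PySem.List.pyGetD (PySem.List.pyGetD matrix i []) j 0)).length = n.toNat := by
      simp [PySem.List.length_pyRange_one]
    have hrk : ((PySem.List.pyRange 0 n 1).map (fun j => pvA matrix n i j))[k]?
        = some (pvA matrix n i (0 + (k : Int))) := by
      rw [List.getElem?_map, PySem.List.getElem?_pyRange_one,
        if_pos (by omega : k < (n - (0:Int)).toNat), Option.map_some]
    rw [hrk]
    by_cases hka : k = (n - 1 - i).toNat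
    · subst hka
      rw [List.getElem?_set_self (by simp [hlen1]; omega)]
      have hcast : (0 : Int) + (((n - 1 - i).toNat : Nat) : Int) = n - 1 - i := by omega
      rw [hcast]
      have hcond : i = n - 1 - i ∨ i + (n - 1 - i) = n - 1 := Or.inr (by ring)
      simp only [pvA]
      rw [if_pos hcond]
      rw [pv_matB_get matrix i (n - 1 - i) hi0 (by omega) (by omega) (by omega)]
    · by_cases hkb : k = i.toNat
      · subst hkb
        rw [List.getElem?_set_ne (by omega), List.getElem?_set_self (by omega)]
        have hcast : (0 : Int) + ((i.toNat : Nat) : Int) = i := by omega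
        rw [hcast]
        simp only [pvA, true_or, if_true]
        rw [pv_matB_get matrix i i hi0 (by omega) hi0 (by omega)]
      · rw [List.getElem?_set_ne (by omega), List.getElem?_set_ne (by omega)]
        rw [List.getElem?_map, PySem.List.getElem?_pyRange_one,
          if_pos (by omega : k < (n - (0:Int)).toNat), Option.map_some]
        have hcond : ¬ (i = 0 + (k : Int) ∨ i + (0 + (k : Int)) = n - 1) := by
          rintro (h | h) <;> omega
        simp only [pvA]
        rw [if_neg hcond]
  · rw [List.getElem?_eq_none (by simp [PySem.List.length_pyRange_one]; omega),
      List.getElem?_eq_none (by simp [PySem.List.length_pyRange_one]; omega)]
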